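-- pv_equiv track=rewrite | github.com/orangeQWJ/myMapReduce | worker/lib/tool.py | get_file_dir
-- ===== SOURCE A (Python) =====
-- def get_file_dir(path):
--     x = 0
--     for i in range(len(path)-1,-1, -1):
--         if path[i] == '/':
--             x = i
--             break
--     file_name = path[:x]
--     return file_name
-- ===== SOURCE B (Python) =====
-- def get_file_dir(path):
--     return '/'.join(path.split('/')[:-1])
-- ===== Notes on version B (the rewrite author's own statement) =====
-- stated objective: idiomatic
-- what changed: Replaces the character-by-character backward index scan plus slicing with splitting the path into components, dropping the last component and rejoining with the separator; the per-character interpreter loop disappears into C-level str.split/str.join.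
import Mathlib
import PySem

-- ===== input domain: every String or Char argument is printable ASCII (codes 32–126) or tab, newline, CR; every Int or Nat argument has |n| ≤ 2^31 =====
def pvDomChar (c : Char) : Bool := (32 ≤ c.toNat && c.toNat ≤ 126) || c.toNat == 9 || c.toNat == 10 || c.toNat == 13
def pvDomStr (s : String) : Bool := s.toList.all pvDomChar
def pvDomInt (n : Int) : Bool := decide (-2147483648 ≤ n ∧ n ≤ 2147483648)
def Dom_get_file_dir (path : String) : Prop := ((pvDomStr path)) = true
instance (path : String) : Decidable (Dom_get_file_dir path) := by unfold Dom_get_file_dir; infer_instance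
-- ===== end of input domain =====

-- B replaces A's per-character backward index scan + slice with: split the path on the separator, drop the last component, rejoin (idiomatic; the interpreter-level loop moves into C builtins).


-- ===== PORT A =====
-- the 'for i in range(len(path)-1,-1,-1): if path[i]=='/': x=i; break' loop, x initially 0
def getFileDirLoop (cs : List Char) : List Int → Int
  | [] => 0
  | i :: rest => if PySem.List.pyGet? cs i = some '/' then i else getFileDirLoop cs rest

def get_file_dir (path : String) : String :=
  let x := getFileDirLoop path.toList (PySem.List.pyRange (PySem.Str.len path - 1) (-1) (-1))
  PySem.Str.slice path none (some x)

-- ===== PORT B =====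
-- '/'.join(path.split('/')[:-1]); split? is some because the separator "/" is nonempty
def get_file_dir_alt (path : String) : String :=
  match PySem.Str.split? path "/" with
  | some parts => PySem.Str.join "/" (PySem.List.slice parts none (some (-1)))
  | none => ""

-- ===== PRECONDITION & SPEC =====
def Spec_get_file_dir (path : String) (out : String) : Prop := out = get_file_dir_alt path
instance (path : String) (out : String) : Decidable (Spec_get_file_dir path out) := by unfold Spec_get_file_dir; infer_instance

-- ===== CLAIM (what is proved, stated in full; the proofs are below) =====
def Claim_equal_get_file_dir : Prop := ∀ (path : String), Dom_get_file_dir path → Spec_get_file_dir path (get_file_dir path)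

-- ===== LEMMAS AND PROOFS =====

-- a fuel-free rendering of PySem.Chars.splitOn on the single-char separator '/'
def pysplit : List Char → List (List Char)
  | [] => [[]]
  | c :: t => if c = '/' then [] :: pysplit t else (pysplit t).modifyHead (c :: ·)

theorem pysplit_ne_nil (cs : List Char) : pysplit cs ≠ [] := by
  cases cs with
  | nil => simp [pysplit]
  | cons c t =>
    simp only [pysplit]
    split_ifs
    · simp
    · cases h : pysplit t with
      | nil => exact absurd h (pysplit_ne_nil t)
      | cons a r => simp [List.modifyHead]

theorem modifyHead_append_of_ne_nil {α : Type} (f : α → α) (l m : List α) (h : l ≠ []) :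
    (l ++ m).modifyHead f = l.modifyHead f ++ m := by
  cases l with
  | nil => exact absurd rfl h
  | cons a t => simp [List.modifyHead]

theorem splitOn_go_eq (fuel : Nat) (cs cur : List Char) (acc : List (List Char))
    (h : cs.length < fuel) :
    PySem.Chars.splitOn.go ['/'] fuel cs cur acc
      = acc.reverse ++ (pysplit cs).modifyHead (cur.reverse ++ ·) := by
  induction fuel generalizing cs cur acc with
  | zero => omega
  | succ f ih =>
    cases cs with
    | nil => simp [PySem.Chars.splitOn.go, pysplit, List.modifyHead]
    | cons c t =>
      by_cases hc : c = '/'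
      · subst hc
        have hpre : List.isPrefixOf ['/'] ('/' :: t) = true := by
          simp [List.isPrefixOf]
        simp only [PySem.Chars.splitOn.go, hpre, if_true]
        rw [show List.drop (['/'].length) ('/' :: t) = t from rfl]
        rw [ih t [] (cur.reverse :: acc) (by simpa using Nat.lt_of_succ_lt_succ h)]
        have : (pysplit t).modifyHead (List.reverse [] ++ ·) = pysplit t := by
          cases ht : pysplit t with
          | nil => exact absurd ht (pysplit_ne_nil t)
          | cons a r => simp [List.modifyHead]
        rw [this]
        simp [pysplit, List.modifyHead]
      · have hpre : List.isPrefixOf ['/'] (c :: t) = false := by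
          simp [List.isPrefixOf, BEq.beq]
          intro hh; exact hc hh.symm
        simp only [PySem.Chars.splitOn.go, hpre]
        rw [if_neg (by simp)]
        rw [ih t (c :: cur) acc (by simpa using Nat.lt_of_succ_lt_succ h)]
        have hne := pysplit_ne_nil t
        cases ht : pysplit t with
        | nil => exact absurd ht hne
        | cons a r =>
          simp [pysplit, hc, ht, List.modifyHead]

theorem splitOn_eq_pysplit (cs : List Char) :
    PySem.Chars.splitOn cs ['/'] = pysplit cs := by
  unfold PySem.Chars.splitOn
  rw [splitOn_go_eq (cs.length + 1) cs [] [] (by omega)]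
  cases h : pysplit cs with
  | nil => exact absurd h (pysplit_ne_nil cs)
  | cons a r => simp [List.modifyHead]

theorem pysplit_no_slash (cs : List Char) (h : '/' ∉ cs) : pysplit cs = [cs] := by
  induction cs with
  | nil => rfl
  | cons c t ih =>
    have hc : c ≠ '/' := fun hh => h (hh ▸ List.mem_cons_self)
    have ht : '/' ∉ t := fun hh => h (List.mem_cons_of_mem _ hh)
    simp [pysplit, hc, ih ht, List.modifyHead]

theorem pysplit_append_slash (pre suf : List Char) (h : '/' ∉ suf) :
    pysplit (pre ++ '/' :: suf) = pysplit pre ++ [suf] := by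
  induction pre with
  | nil => simp [pysplit, pysplit_no_slash suf h]
  | cons c t ih =>
    by_cases hc : c = '/'
    · simp [pysplit, hc, ih]
    · simp [pysplit, hc, ih, modifyHead_append_of_ne_nil _ _ _ (pysplit_ne_nil t)]

theorem join_pysplit (cs : List Char) : PySem.Chars.join ['/'] (pysplit cs) = cs := by
  induction cs with
  | nil => simp [pysplit, PySem.Chars.join_singleton]
  | cons c t ih =>
    cases ht : pysplit t with
    | nil => exact absurd ht (pysplit_ne_nil t)
    | cons a r =>
      by_cases hc : c = '/'
      · subst hc
        rw [show pysplit ('/' :: t) = [] :: a :: r by simp [pysplit, ht]]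
        rw [PySem.Chars.join_cons_cons]
        rw [ht] at ih; rw [ih]; rfl
      · rw [show pysplit (c :: t) = (c :: a) :: r by simp [pysplit, hc, ht, List.modifyHead]]
        rw [ht] at ih
        cases r with
        | nil =>
          rw [PySem.Chars.join_singleton] at ih ⊢
          simp [ih]
        | cons b r' =>
          rw [PySem.Chars.join_cons_cons] at ih ⊢
          simp [ih]

theorem loop_no_slash (cs : List Char) (h : '/' ∉ cs) (idxs : List Int) :
    getFileDirLoop cs idxs = 0 := by
  induction idxs with
  | nil => rfl
  | cons i rest ih =>
    simp only [getFileDirLoop]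
    rw [if_neg, ih]
    intro hg
    exact h (PySem.List.mem_of_pyGet?_eq_some cs hg)

theorem loop_skip (cs : List Char) (xs ys : List Int)
    (h : ∀ i ∈ xs, PySem.List.pyGet? cs i ≠ some '/') :
    getFileDirLoop cs (xs ++ ys) = getFileDirLoop cs ys := by
  induction xs with
  | nil => rfl
  | cons i rest ih =>
    simp only [List.cons_append, getFileDirLoop]
    rw [if_neg (h i List.mem_cons_self), ih (fun j hj => h j (List.mem_cons_of_mem _ hj))]

theorem exists_last_slash (cs : List Char) (h : '/' ∈ cs) :
    ∃ pre suf, cs = pre ++ '/' :: suf ∧ '/' ∉ suf := by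
  induction cs with
  | nil => simp at h
  | cons c t ih =>
    by_cases ht : '/' ∈ t
    · obtain ⟨pre, suf, he, hn⟩ := ih ht
      exact ⟨c :: pre, suf, by simp [he], hn⟩
    · have hc : c = '/' := by
        rcases List.mem_cons.mp h with h1 | h2
        · exact h1.symm
        · exact absurd h2 ht
      exact ⟨[], t, by simp [hc], ht⟩

theorem loop_finds_last (pre suf : List Char) (h : '/' ∉ suf) :
    getFileDirLoop (pre ++ '/' :: suf)
      (PySem.List.pyRange ((pre ++ '/' :: suf).length - 1) (-1) (-1)) = (pre.length : Int) := by
  set cs := pre ++ '/' :: suf with hcs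
  have hn : (cs.length : Int) = pre.length + 1 + suf.length := by simp [hcs]; omega
  have hrange : PySem.List.pyRange ((cs.length : Int) - 1) (-1) (-1)
      = (PySem.List.pyRange 0 (cs.length : Int) 1).reverse := by
    have := PySem.List.pyRange_neg_one_eq_reverse ((cs.length : Int) - 1) (-1)
    simpa using this
  rw [hrange]
  have hsplit : PySem.List.pyRange 0 (cs.length : Int) 1
      = (PySem.List.pyRange 0 (pre.length : Int) 1 ++ [(pre.length : Int)])
        ++ PySem.List.pyRange ((pre.length : Int) + 1) (cs.length : Int) 1 := by
    rw [← PySem.List.pyRange_one_succ_right (by positivity)]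
    rw [← PySem.List.pyRange_one_append 0 ((pre.length : Int) + 1) (cs.length : Int)
      (by positivity) (by omega)]
  rw [hsplit]
  rw [List.reverse_append, List.reverse_append]
  have hskip : ∀ i ∈ (PySem.List.pyRange ((pre.length : Int) + 1) (cs.length : Int) 1).reverse,
      PySem.List.pyGet? cs i ≠ some '/' := by
    intro i hi
    rw [List.mem_reverse] at hi
    have hb := PySem.List.mem_pyRange_one.mp hi
    rw [PySem.List.pyGet?_of_nonneg cs (by omega)]
    have hlen : (pre ++ ['/']).length ≤ i.toNat := by simp; omega
    rw [show cs = (pre ++ ['/']) ++ suf by simp [hcs]]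
    rw [List.getElem?_append_right hlen]
    intro hg
    rcases List.getElem?_eq_some_iff.mp hg with ⟨hlt, he⟩
    exact h (he ▸ List.getElem_mem hlt)
  rw [loop_skip cs _ _ hskip]
  simp only [List.reverse_cons, List.reverse_nil, List.nil_append, List.singleton_append,
    getFileDirLoop]
  rw [if_pos (by rw [hcs]; exact PySem.List.pyGet?_append_length pre suf '/')]

theorem get_file_dir_eq (path : String) : get_file_dir path = get_file_dir_alt path := by
  apply String.toList_inj.mp
  -- B side: reduce to pysplit
  have hsp := PySem.Str.split?_map path "/"
  rw [show PySem.Chars.split? path.toList "/".toList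
      = some (PySem.Chars.splitOn path.toList ['/']) by simp [PySem.Chars.split?]] at hsp
  cases hq : PySem.Str.split? path "/" with
  | none => rw [hq] at hsp; simp at hsp
  | some parts =>
  rw [hq] at hsp
  simp only [Option.map_some, Option.some.injEq] at hsp
  have hmap : parts.map String.toList = pysplit path.toList := by
    rw [hsp]; exact splitOn_eq_pysplit path.toList
  have hB : (get_file_dir_alt path).toList
      = PySem.Chars.join ['/'] ((pysplit path.toList).dropLast) := by
    simp only [get_file_dir_alt, hq]
    rw [PySem.Str.toList_join, PySem.List.slice_to_neg_one]
    rw [show List.map String.toList parts.dropLast = (List.map String.toList parts).dropLast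
      from List.map_dropLast, hmap]
    rfl
  -- A side
  have hA : ∀ x : Int, 0 ≤ x →
      (PySem.Str.slice path none (some x)).toList = path.toList.take x.toNat := by
    intro x hx
    rw [PySem.Str.toList_slice, PySem.Chars.slice_eq_listSlice, PySem.List.slice_to _ hx]
  have hlen : PySem.Str.len path = (path.toList.length : Int) := rfl
  by_cases hs : '/' ∈ path.toList
  · obtain ⟨pre, suf, he, hn⟩ := exists_last_slash path.toList hs
    have hloop : getFileDirLoop path.toList
        (PySem.List.pyRange (PySem.Str.len path - 1) (-1) (-1)) = (pre.length : Int) := by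
      rw [hlen]
      conv_lhs => rw [he]
      exact loop_finds_last pre suf hn
    simp only [get_file_dir, hloop]
    rw [hA _ (by positivity), hB]
    rw [he, pysplit_append_slash pre suf hn, List.dropLast_concat, join_pysplit]
    simpa using List.take_left (l₁ := pre) (l₂ := '/' :: suf)
  · have hloop : getFileDirLoop path.toList
        (PySem.List.pyRange (PySem.Str.len path - 1) (-1) (-1)) = 0 :=
      loop_no_slash path.toList hs _
    simp only [get_file_dir, hloop]
    rw [hA 0 le_rfl, hB, pysplit_no_slash path.toList hs]
    simp [PySem.Chars.join_nil]

-- ===== VERDICT (by name: the statement is the Claim_ definition above) =====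
theorem get_file_dir_spec : Claim_equal_get_file_dir := by
  intro path _
  unfold Spec_get_file_dir
  exact get_file_dir_eq path
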